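-- pv_equiv track=rewrite | github.com/uservan/cross_domain | verify/score/puzzle_tasks/car_painting/verifier.py | calculate_switches
-- ===== SOURCE A (Python) =====
-- def calculate_switches(car_order, colors):
--     """
--     Calculate the number of color switches in a given car order
--
--     Parameters:
--     - car_order: List of car IDs
--     - colors: List of colors corresponding to each car
--
--     Returns:
--     - Number of color switches
--     """
--     if not car_order:
--         return 0
--
--     switches = 0
--     for i in range(1, len(car_order)):
--         current_car = car_order[i]
--         prev_car = car_order[i-1]
--         # Car IDs start from 1, but list indices start from 0, so subtract 1
--         if colors[current_car-1] != colors[prev_car-1]: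
--             switches += 1
--
--     return switches
-- ===== SOURCE B (Python) =====
-- def calculate_switches(car_order, colors):
--     """
--     Calculate the number of color switches in a given car order
--
--     Returns the number of maximal same-color runs in the mapped color
--     sequence, minus one (equal to the number of adjacent color switches).
--     """
--     if not car_order:
--         return 0
--     seq = [colors[c - 1] for c in car_order]
--     groups = 0
--     i, n = 0, len(seq)
--     while i < n:
--         groups += 1
--         x = seq[i]
--         while i < n and seq[i] == x:
--             i += 1
--     return groups - 1
-- ===== Notes on version B (the rewrite author's own statement) =====
-- stated objective: alternative
-- what changed: B maps the car order to its color sequence once and counts maximal same-color runs (run-skipping scan, groups - 1) instead of A's pairwise index loop comparing colors[order[i]-1] with colors[order[i-1]-1].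
-- outside the precondition, e.g. on calculate_switches([24], ['x']): A returns 0, B raises IndexError
import Mathlib
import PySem

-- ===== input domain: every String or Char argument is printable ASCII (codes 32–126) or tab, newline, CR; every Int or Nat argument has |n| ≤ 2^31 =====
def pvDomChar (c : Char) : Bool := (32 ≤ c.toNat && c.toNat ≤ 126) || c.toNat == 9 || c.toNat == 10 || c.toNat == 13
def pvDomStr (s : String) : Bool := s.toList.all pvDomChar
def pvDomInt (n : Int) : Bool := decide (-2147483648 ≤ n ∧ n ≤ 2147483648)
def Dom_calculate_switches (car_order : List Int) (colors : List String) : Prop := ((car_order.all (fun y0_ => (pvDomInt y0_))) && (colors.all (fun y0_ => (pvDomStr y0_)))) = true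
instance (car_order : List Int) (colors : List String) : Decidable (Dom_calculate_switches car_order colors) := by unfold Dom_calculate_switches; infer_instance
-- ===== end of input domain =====

-- B counts maximal same-color runs of the mapped color sequence (groups - 1) instead of A's pairwise index loop; objective: alternative decomposition.


-- ===== PORT A =====
-- literal port of A: guard empty, then fold over range(1, len(car_order)) counting
-- adjacent color differences; list indexing is PySem.List.pyGetD (in range under Pre_).
def calculate_switches (car_order : List Int) (colors : List String) : Int :=
  if car_order = [] then 0
  else
    (PySem.List.pyRange 1 (car_order.length : Int) 1).foldl
      (fun switches i =>
        let current_car := PySem.List.pyGetD car_order i 0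
        let prev_car := PySem.List.pyGetD car_order (i - 1) 0
        if PySem.List.pyGetD colors (current_car - 1) ""
             ≠ PySem.List.pyGetD colors (prev_car - 1) "" then switches + 1
        else switches) 0

-- ===== PORT B =====
-- number of maximal runs of equal adjacent elements (B's outer loop; the inner
-- run-skipping while-loop is the dropWhile).
def pvNumGroups : List String → Nat
  | [] => 0
  | x :: xs => 1 + pvNumGroups (xs.dropWhile (· == x))
termination_by l => l.length
decreasing_by
  exact Nat.lt_succ_of_le (List.length_dropWhile_le _ _)

def calculate_switches_alt (car_order : List Int) (colors : List String) : Int :=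
  if car_order = [] then 0
  else
    let seq := car_order.map (fun c => PySem.List.pyGetD colors (c - 1) "")
    (pvNumGroups seq : Int) - 1

-- ===== PRECONDITION & SPEC =====
-- Pre_ excludes the inputs where some car id c has c-1 outside Python's (negative-wrapping)
-- index range of colors: there Python A raises IndexError, except when car_order has fewer than
-- two elements (A's loop indexes nothing and returns 0) while B's mapping still raises IndexError.
def Pre_calculate_switches (car_order : List Int) (colors : List String) : Prop :=
  ∀ c ∈ car_order, 1 - (colors.length : Int) ≤ c ∧ c ≤ (colors.length : Int)
instance (car_order : List Int) (colors : List String) : Decidable (Pre_calculate_switches car_order colors) := by unfold Pre_calculate_switches; infer_instance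
def pvWitness_calculate_switches : List Int × List String := ([1, 2, 1, 0], ["red", "blue"])

def Spec_calculate_switches (car_order : List Int) (colors : List String) (out : Int) : Prop := out = calculate_switches_alt car_order colors
instance (car_order : List Int) (colors : List String) (out : Int) : Decidable (Spec_calculate_switches car_order colors out) := by unfold Spec_calculate_switches; infer_instance

-- ===== CLAIM (what is proved, stated in full; the proofs are below) =====
def Claim_equal_calculate_switches : Prop := ∀ (car_order : List Int) (colors : List String), Dom_calculate_switches car_order colors → Pre_calculate_switches car_order colors → Spec_calculate_switches car_order colors (calculate_switches car_order colors)

-- ===== LEMMAS AND PROOFS =====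

-- number of adjacent unequal pairs
def countAdj : List String → Int
  | x :: y :: t => (if y ≠ x then 1 else 0) + countAdj (y :: t)
  | _ => 0

theorem pvNumGroups_cons (x : String) (xs : List String) :
    pvNumGroups (x :: xs) = 1 + pvNumGroups (xs.dropWhile (· == x)) := by
  rw [pvNumGroups.eq_def]

theorem countAdj_cons2 (x y : String) (t : List String) :
    countAdj (x :: y :: t) = (if y ≠ x then 1 else 0) + countAdj (y :: t) := rfl

theorem countAdj_short (l : List String) (h : l.length ≤ 1) : countAdj l = 0 := by
  match l, h with
  | [], _ => rfl
  | [x], _ => rfl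

theorem pvNumGroups_dropWhile (xs : List String) :
    ∀ x : String, (pvNumGroups (xs.dropWhile (· == x)) : Int) = countAdj (x :: xs) := by
  induction xs with
  | nil => intro x; simp [pvNumGroups, countAdj]
  | cons y t ih =>
    intro x
    by_cases h : y = x
    · subst h
      simp only [List.dropWhile_cons, BEq.rfl, if_true]
      rw [ih y]
      simp [countAdj]
    · have hb : (y == x) = false := by simp [h]
      rw [List.dropWhile_cons]
      simp only [hb, Bool.false_eq_true, if_false]
      rw [pvNumGroups_cons]
      push_cast
      rw [ih y]
      simp [countAdj, h]

theorem alt_eq_countAdj (car_order : List Int) (colors : List String) (h : car_order ≠ []) :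
    calculate_switches_alt car_order colors
      = countAdj (car_order.map (fun c => PySem.List.pyGetD colors (c - 1) "")) := by
  unfold calculate_switches_alt
  rw [if_neg h]
  match car_order, h with
  | c :: rest, _ =>
    simp only [List.map_cons]
    rw [pvNumGroups_cons]
    push_cast
    rw [pvNumGroups_dropWhile]
    ring

theorem fold_eq_countAdj (car_order : List Int) (colors : List String) :
    ∀ (n k : Nat) (acc : Int), car_order.length - k = n → 1 ≤ k → k ≤ car_order.length →
    (PySem.List.pyRange (k : Int) (car_order.length : Int) 1).foldl
      (fun switches i =>
        let current_car := PySem.List.pyGetD car_order i 0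
        let prev_car := PySem.List.pyGetD car_order (i - 1) 0
        if PySem.List.pyGetD colors (current_car - 1) ""
             ≠ PySem.List.pyGetD colors (prev_car - 1) "" then switches + 1
        else switches) acc
      = acc + countAdj ((car_order.map (fun c => PySem.List.pyGetD colors (c - 1) "")).drop (k - 1)) := by
  intro n
  induction n with
  | zero =>
    intro k acc hn hk1 hk2
    have hk : k = car_order.length := by omega
    rw [PySem.List.pyRange_one_eq_nil (by omega)]
    have hlen : ((car_order.map (fun c => PySem.List.pyGetD colors (c - 1) "")).drop (k - 1)).length ≤ 1 := by
      simp; omega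
    simp [countAdj_short _ hlen]
  | succ m ih =>
    intro k acc hn hk1 hk2
    have hklt : k < car_order.length := by omega
    rw [PySem.List.pyRange_one_cons (by exact_mod_cast hklt)]
    rw [List.foldl_cons]
    have hcast : ((k : Int) - 1) = ((k - 1 : Nat) : Int) := by omega
    have hcur : PySem.List.pyGetD car_order (k : Int) 0 = car_order.getD k 0 :=
      PySem.List.pyGetD_natCast _ _ _
    have hprev : PySem.List.pyGetD car_order ((k : Int) - 1) 0 = car_order.getD (k - 1) 0 := by
      rw [hcast]; exact PySem.List.pyGetD_natCast _ _ _
    have hrec : ((k : Int) + 1) = ((k + 1 : Nat) : Int) := by omega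
    rw [hcur, hprev, hrec, ih (k + 1) _ (by omega) (by omega) (by omega)]
    -- now identify the drop with a two-head cons
    set seq := car_order.map (fun c => PySem.List.pyGetD colors (c - 1) "") with hseq
    have hseqlen : seq.length = car_order.length := by simp [hseq]
    have h1 : k - 1 < seq.length := by omega
    have h2 : k < seq.length := by omega
    have hk1' : k - 1 < car_order.length := by omega
    have hd1 : seq.drop (k - 1) = seq[k - 1] :: seq.drop k := by
      have := List.drop_eq_getElem_cons h1
      simpa [Nat.sub_add_cancel hk1] using this
    have hd2 : seq.drop k = seq[k] :: seq.drop (k + 1) := List.drop_eq_getElem_cons h2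
    have hck : car_order.getD k 0 = car_order[k]'hklt := List.getD_eq_getElem _ _ hklt
    have hck1 : car_order.getD (k - 1) 0 = car_order[k - 1]'hk1' := List.getD_eq_getElem _ _ hk1'
    have hgk : seq[k]'h2 = PySem.List.pyGetD colors ((car_order[k]'hklt) - 1) "" := by
      simp [hseq]
    have hgk1 : seq[k - 1]'h1 = PySem.List.pyGetD colors ((car_order[k - 1]'hk1') - 1) "" := by
      simp [hseq]
    rw [hd1, hd2, countAdj_cons2, ← hd2]
    simp only [hck, hck1, ← hgk, ← hgk1, Nat.add_sub_cancel]
    split_ifs <;> ring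

-- ===== VERDICT (by name: the statement is the Claim_ definition above) =====
theorem calculate_switches_spec : Claim_equal_calculate_switches := by
  intro car_order colors _ _
  unfold Spec_calculate_switches
  by_cases h : car_order = []
  · subst h; rfl
  · unfold calculate_switches
    rw [if_neg h, alt_eq_countAdj _ _ h]
    have hlen : 1 ≤ car_order.length := by
      cases car_order with
      | nil => exact absurd rfl h
      | cons _ _ => simp
    have := fold_eq_countAdj car_order colors (car_order.length - 1) 1 0 rfl (by omega) hlen
    simpa using this
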